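-- pv_equiv track=rewrite | github.com/astro-jingtao/tex_tool | bib/merge_bib.py | get_doi_dict
-- ===== SOURCE A (Python) =====
-- from typing import Dict, List
--
-- def get_doi_dict(entries_dict: Dict[str, Dict[str, str]]):
--     doi_dict = {}
--     for _id, this_entry in entries_dict.items():
--         if 'doi' in this_entry:
--             if this_entry['doi'] not in doi_dict:
--                 doi_dict[this_entry['doi']] = [_id]
--             else:
--                 doi_dict[this_entry['doi']].append(_id)
--     return doi_dict
-- ===== SOURCE B (Python) =====
-- def _group(pairs):
--     # recursive grouping: peel off the first doi, collect all its ids, recurse on the rest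
--     if not pairs:
--         return {}
--     (d, i), rest = pairs[0], pairs[1:]
--     same = [j for e, j in rest if e == d]
--     others = [p for p in rest if p[0] != d]
--     return {d: [i] + same, **_group(others)}
--
-- def get_doi_dict(entries_dict):
--     pairs = [(e['doi'], i) for i, e in entries_dict.items() if 'doi' in e]
--     return _group(pairs)
-- ===== Notes on version B (the rewrite author's own statement) =====
-- stated objective: alternative
-- what changed: A accumulates a doi->ids dict in one pass with insert-or-append; B first extracts the (doi, id) pairs and then groups them by a recursion that peels off the first doi, collects all its ids by a scan, and recurses on the pairs with other dois.
import Mathlib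
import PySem

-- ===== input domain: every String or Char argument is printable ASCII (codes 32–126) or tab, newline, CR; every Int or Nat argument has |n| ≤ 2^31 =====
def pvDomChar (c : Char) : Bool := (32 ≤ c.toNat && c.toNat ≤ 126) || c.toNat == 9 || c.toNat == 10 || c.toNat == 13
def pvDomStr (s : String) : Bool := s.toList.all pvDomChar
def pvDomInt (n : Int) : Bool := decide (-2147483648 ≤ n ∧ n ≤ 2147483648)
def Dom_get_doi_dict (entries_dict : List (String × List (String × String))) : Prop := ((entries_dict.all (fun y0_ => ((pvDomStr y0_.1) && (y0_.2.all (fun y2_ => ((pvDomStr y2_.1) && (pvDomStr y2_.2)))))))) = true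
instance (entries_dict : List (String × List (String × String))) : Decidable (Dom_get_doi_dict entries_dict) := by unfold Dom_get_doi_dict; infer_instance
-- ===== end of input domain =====

-- B replaces A's single-pass dict accumulation by a recursive grouping (peel the first doi,
-- collect its ids, recurse on the remaining pairs); objective: alternative decomposition, same result.

-- ===== PORT A =====
-- A: one pass over the entries, accumulating a dict doi ↦ list of ids (insert new key / append to old).
def get_doi_dict (entries_dict : List (String × List (String × String))) : List (String × List String) :=
  (entries_dict.foldl
    (fun doi_dict e =>
      let this_entry := PySem.Dict.mk e.2
      if this_entry.contains "doi" then
        -- subscript this_entry["doi"] is guarded by the membership test, so get? is some; getD "" is exact here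
        let doi := (this_entry.get? "doi").getD ""
        if doi_dict.contains doi = false then
          doi_dict.insert doi [e.1]
        else
          doi_dict.modify doi [] (fun l => l ++ [e.1])
      else doi_dict)
    PySem.Dict.empty).items

-- ===== PORT B =====
-- pairs = [(e['doi'], i) for i, e in entries_dict.items() if 'doi' in e]
def pvPairs (entries_dict : List (String × List (String × String))) : List (String × String) :=
  entries_dict.filterMap (fun e => ((PySem.Dict.mk e.2).get? "doi").map (fun d => (d, e.1)))

-- _group: recursive grouping; the dict literal {d: [i]+same, **_group(others)} is a cons,
-- since every key of _group(others) differs from d.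
def pvGroup : List (String × String) → List (String × List String)
  | [] => []
  | (d, i) :: rest =>
      (d, i :: (rest.filter (fun p => p.1 == d)).map Prod.snd)
        :: pvGroup (rest.filter (fun p => p.1 != d))
termination_by ps => ps.length
decreasing_by
  simp only [List.length_cons]
  exact Nat.lt_succ_of_le (by simpa using List.length_filter_le _ rest.attach)

def get_doi_dict_alt (entries_dict : List (String × List (String × String))) : List (String × List String) :=
  pvGroup (pvPairs entries_dict)

-- ===== PRECONDITION & SPEC =====
def Spec_get_doi_dict (entries_dict : List (String × List (String × String))) (out : List (String × List String)) : Prop := out = get_doi_dict_alt entries_dict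
instance (entries_dict : List (String × List (String × String))) (out : List (String × List String)) : Decidable (Spec_get_doi_dict entries_dict out) := by unfold Spec_get_doi_dict; infer_instance

-- ===== CLAIM (what is proved, stated in full; the proofs are below) =====
def Claim_equal_get_doi_dict : Prop := ∀ (entries_dict : List (String × List (String × String))), Dom_get_doi_dict entries_dict → Spec_get_doi_dict entries_dict (get_doi_dict entries_dict)

-- ===== LEMMAS AND PROOFS =====

-- A's insert-or-append branch is exactly Dict.modify with default [].
theorem pv_step_eq (dd : PySem.Dict String (List String)) (k : String) (i : String) :
    (if dd.contains k = false then dd.insert k [i] else dd.modify k [] (fun l => l ++ [i]))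
      = dd.modify k [] (fun l => l ++ [i]) := by
  by_cases h : dd.contains k = false
  · simp [h, PySem.Dict.modify, PySem.Dict.getD_of_not_contains dd _ h]
  · simp [h]

-- A's loop over entries equals the pair-wise modify loop over pvPairs.
theorem pv_foldA_eq (entries : List (String × List (String × String)))
    (dd : PySem.Dict String (List String)) :
    entries.foldl
      (fun doi_dict e =>
        let this_entry := PySem.Dict.mk e.2
        if this_entry.contains "doi" then
          let doi := (this_entry.get? "doi").getD ""
          if doi_dict.contains doi = false then
            doi_dict.insert doi [e.1]
          else
            doi_dict.modify doi [] (fun l => l ++ [e.1])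
        else doi_dict) dd
      = (pvPairs entries).foldl (fun d p => d.modify p.1 [] (fun l => l ++ [p.2])) dd := by
  induction entries generalizing dd with
  | nil => rfl
  | cons e rest ih =>
      cases h : (PySem.Dict.mk e.2).get? "doi" with
      | none =>
          have hc : (PySem.Dict.mk e.2).contains "doi" = false := by
            rw [PySem.Dict.contains_eq_isSome_get?, h]; rfl
          simp only [List.foldl_cons, hc, Bool.false_eq_true, if_false,
            pvPairs, List.filterMap_cons, h]
          exact ih dd
      | some v =>
          have hc : (PySem.Dict.mk e.2).contains "doi" = true := by
            rw [PySem.Dict.contains_eq_isSome_get?, h]; rfl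
          simp only [List.foldl_cons, pvPairs, List.filterMap_cons, h, Option.map_some, hc,
            if_true, Option.getD_some]
          rw [pv_step_eq]
          exact ih _

-- The modify loop from the empty dict, characterised: first-occurrence dois, filtered ids.
theorem pv_fold_items (ps : List (String × String)) :
    (ps.foldl (fun d p => d.modify p.1 [] (fun l => l ++ [p.2]))
        (PySem.Dict.empty : PySem.Dict String (List String))).items
      = (PySem.Set.ofList (ps.map Prod.fst)).map
          (fun k => (k, (ps.filter (fun p => p.1 == k)).map Prod.snd)) := by
  have hnd : (ps.foldl (fun d p => d.modify p.1 [] (fun l => l ++ [p.2]))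
      (PySem.Dict.empty : PySem.Dict String (List String))).keys.Nodup := by
    exact PySem.Dict.nodup_keys_foldl_modify_key ps Prod.fst [] (fun d p l => l ++ [p.2]) _
      (by rw [PySem.Dict.keys_empty]; exact List.nodup_nil)
  rw [PySem.Dict.items_eq_map_keys _ hnd ([] : List String)]
  rw [PySem.Dict.keys_foldl_modify_key ps Prod.fst [] (fun d p l => l ++ [p.2]),
    PySem.Dict.keys_empty, PySem.Set.update_nil_left]
  refine List.map_congr_left (fun k _ => ?_)
  rw [PySem.Dict.getD_foldl_modify_append ps PySem.Dict.empty k, PySem.Dict.getD_empty]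
  simp

-- Set.ofList on a cons: head, then the later distinct elements not equal to the head.
theorem pv_ofList_cons (x : String) (xs : List String) :
    PySem.Set.ofList (x :: xs) = x :: (PySem.Set.ofList xs).filter (fun y => !(y == x)) := by
  have h1 : PySem.Set.ofList (x :: xs) = PySem.Set.update [x] xs := by
    simp [PySem.Set.ofList, PySem.Set.update, PySem.Set.add, PySem.Set.empty, PySem.Set.contains]
  rw [h1, PySem.Set.update_eq_append_filter]
  have h2 : (fun y : String => !PySem.Set.contains [x] y) = (fun y => !(y == x)) := by
    funext y; by_cases hy : y = x <;> simp [PySem.Set.contains, hy]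
  rw [h2]
  rfl

-- first-occurrence deduplication commutes with filtering.
theorem pv_ofList_filter (q : String → Bool) (l : List String) :
    PySem.Set.ofList (l.filter q) = (PySem.Set.ofList l).filter q := by
  induction l with
  | nil => rfl
  | cons x xs ih =>
      by_cases hq : q x = true
      · rw [List.filter_cons_of_pos hq, pv_ofList_cons, pv_ofList_cons, ih,
          List.filter_cons_of_pos hq, List.filter_comm]
      · rw [List.filter_cons_of_neg (by simpa using hq), pv_ofList_cons, ih,
          List.filter_cons_of_neg (by simpa using hq), List.filter_comm]
        refine (List.filter_eq_self.mpr (fun y hy => ?_)).symm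
        have hmy : q y = true := (List.mem_filter.mp hy).2
        simp only [Bool.not_eq_eq_eq_not, Bool.not_true, beq_eq_false_iff_ne]
        intro he
        rw [he] at hmy
        exact hq hmy

theorem pv_filter_filter_ne (rest : List (String × String)) (k d : String) (h : k ≠ d) :
    (rest.filter (fun p => p.1 != d)).filter (fun p => p.1 == k)
      = rest.filter (fun p => p.1 == k) := by
  rw [List.filter_filter]
  refine List.filter_congr (fun p _ => ?_)
  by_cases hp : p.1 = k
  · subst hp
    simp [h]
  · simp [hp]

-- pvGroup computes exactly the first-occurrence/filter characterisation above.
theorem pv_group_aux : ∀ (n : Nat) (ps : List (String × String)), ps.length ≤ n →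
    pvGroup ps = (PySem.Set.ofList (ps.map Prod.fst)).map
        (fun k => (k, (ps.filter (fun p => p.1 == k)).map Prod.snd)) := by
  intro n
  induction n with
  | zero =>
      intro ps h
      have : ps = [] := List.length_eq_zero_iff.mp (Nat.le_zero.mp h)
      subst this
      rw [pvGroup]; rfl
  | succ n ih =>
      intro ps h
      cases ps with
      | nil => rw [pvGroup]; rfl
      | cons p rest =>
          obtain ⟨d, i⟩ := p
          rw [pvGroup]
          have hrest : (rest.filter (fun p => p.1 != d)).length ≤ n := by
            have := List.length_filter_le (fun p => p.1 != d) rest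
            simp only [List.length_cons] at h
            omega
          rw [ih _ hrest]
          simp only [List.map_cons, pv_ofList_cons, List.map_cons]
          congr 1
          · simp
          · have hmap : (rest.filter (fun p => p.1 != d)).map Prod.fst
                = (rest.map Prod.fst).filter (fun y => !(y == d)) := by
              rw [List.filter_map]
              rfl
            rw [hmap, pv_ofList_filter]
            refine List.map_congr_left (fun k hk => ?_)
            have hkd : k ≠ d := by
              have := (List.mem_filter.mp hk).2
              simpa using this
            rw [pv_filter_filter_ne rest k d hkd]
            have hhd : ((d, i) :: rest).filter (fun p => p.1 == k)
                = rest.filter (fun p => p.1 == k) := by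
              rw [List.filter_cons_of_neg]
              simp [Ne.symm hkd]
            rw [hhd]

theorem pv_group_eq (ps : List (String × String)) :
    pvGroup ps = (PySem.Set.ofList (ps.map Prod.fst)).map
        (fun k => (k, (ps.filter (fun p => p.1 == k)).map Prod.snd)) :=
  pv_group_aux ps.length ps (le_refl _)

-- ===== VERDICT (by name: the statement is the Claim_ definition above) =====
theorem get_doi_dict_spec : Claim_equal_get_doi_dict := by
  intro entries _
  show get_doi_dict entries = get_doi_dict_alt entries
  rw [get_doi_dict, get_doi_dict_alt, pv_foldA_eq, pv_fold_items, pv_group_eq]
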